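-- pv_equiv track=rewrite | github.com/a2sensor/sensor-collect | a2sensor/sensor_collect/local_sensors.py | to_status
-- ===== SOURCE A (Python) =====
-- from typing import Dict, List
--
-- def to_status(previousValues: List[bool]) -> str:
--     """
--     Converts given values from the sensors into a sensor status.
--     :param previousValues: The previous values.
--     :type previousValues: List[bool]
--     :return: The status.
--     :rtype: str
--     """
--     if all(previousValues):
--         result = "stuck"
--     elif all(not x for x in previousValues):
--         result = "empty"
--     else:
--         result = "ok"
--
--     return result
-- ===== SOURCE B (Python) =====
-- def to_status(previousValues):
--     n = len(previousValues)
--     t = sum(1 for x in previousValues if x)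
--     if t == n:
--         return "stuck"
--     elif t == 0:
--         return "empty"
--     else:
--         return "ok"
-- ===== Notes on version B (the rewrite author's own statement) =====
-- stated objective: alternative
-- what changed: Replaces the two short-circuiting all() scans with a single pass counting true values, then compares the count to the length and to zero.
import Mathlib
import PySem

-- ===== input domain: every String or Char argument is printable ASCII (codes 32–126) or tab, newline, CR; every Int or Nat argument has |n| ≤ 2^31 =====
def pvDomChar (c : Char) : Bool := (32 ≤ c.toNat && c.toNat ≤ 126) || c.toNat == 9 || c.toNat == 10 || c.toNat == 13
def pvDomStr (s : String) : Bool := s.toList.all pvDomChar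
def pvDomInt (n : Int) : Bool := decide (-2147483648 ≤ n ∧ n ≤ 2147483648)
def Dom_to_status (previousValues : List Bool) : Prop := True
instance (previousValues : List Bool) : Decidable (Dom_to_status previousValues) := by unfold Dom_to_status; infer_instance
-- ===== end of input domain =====

-- B replaces A's two short-circuiting all() scans with a single pass counting true values, then compares the count to the length and to zero (alternative decomposition, same cost).


-- ===== PORT A =====
def to_status (previousValues : List Bool) : String :=
  if previousValues.all (fun x => x) then "stuck"
  else if previousValues.all (fun x => !x) then "empty"
  else "ok"

-- ===== PORT B =====
-- one pass: count true values, then compare the count to the length and to zero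
def to_status_alt (previousValues : List Bool) : String :=
  let n := previousValues.length
  let t := previousValues.foldl (fun acc x => if x then acc + 1 else acc) 0
  if t = n then "stuck" else if t = 0 then "empty" else "ok"

-- ===== PRECONDITION & SPEC =====
def Spec_to_status (previousValues : List Bool) (out : String) : Prop := out = to_status_alt previousValues
instance (previousValues : List Bool) (out : String) : Decidable (Spec_to_status previousValues out) := by unfold Spec_to_status; infer_instance

-- ===== CLAIM (what is proved, stated in full; the proofs are below) =====
def Claim_equal_to_status : Prop := ∀ (previousValues : List Bool), Dom_to_status previousValues → Spec_to_status previousValues (to_status previousValues)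

-- ===== LEMMAS AND PROOFS =====

-- ===== VERDICT (by name: the statement is the Claim_ definition above) =====
theorem count_foldl (l : List Bool) (a : Nat) :
    l.foldl (fun acc x => if x then acc + 1 else acc) a = a + l.count true := by
  induction l generalizing a with
  | nil => simp
  | cons h tl ih => cases h <;> simp [ih] <;> omega

theorem all_id_iff (l : List Bool) : l.all (fun x => x) = true ↔ l.count true = l.length := by
  rw [List.count_eq_length, List.all_eq_true]
  constructor <;> intro h b hb <;> simpa using (h b hb).symm ▸ (by simpa using h b hb)

theorem all_not_iff (l : List Bool) : l.all (fun x => !x) = true ↔ l.count true = 0 := by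
  rw [List.count_eq_zero, List.all_eq_true]
  constructor
  · intro h hmem; simpa using h true hmem
  · intro h b hb; cases b
    · rfl
    · exact absurd hb h

theorem to_status_spec : Claim_equal_to_status := by
  intro l _
  unfold Spec_to_status to_status to_status_alt
  simp only [count_foldl, Nat.zero_add]
  by_cases h1 : l.count true = l.length
  · simp [h1, (all_id_iff l).mpr h1]
  · have h1' : ¬ l.all (fun x => x) = true := fun h => h1 ((all_id_iff l).mp h)
    by_cases h0 : l.count true = 0
    · simp [h1', h0, (all_not_iff l).mpr h0]; omega
    · have h0' : ¬ l.all (fun x => !x) = true := fun h => h0 ((all_not_iff l).mp h)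
      simp [h1, h1', h0, h0']
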